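-- pv_equiv track=rewrite | github.com/rarmnsyah/Learning-Python | test.py | AyoBerhitung
-- ===== SOURCE A (Python) =====
-- def AyoBerhitung(A):
--     output = 0
--     stk = []
--     for i in A:
--         if i > 0:
--             output += i
--             stk = []
--         else:
--             stk.append(i)
--             if len(stk) == 5:
--                 output += max(stk)
--
--     return output
-- ===== SOURCE B (Python) =====
-- def AyoBerhitung(A):
--     # consume A as maximal same-sign runs: add sum of each positive run,
--     # and max of the first five of each non-positive run of length >= 5
--     output = 0
--     i = 0
--     n = len(A)
--     while i < n:
--         j = i
--         if A[i] > 0: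
--             while j < n and A[j] > 0:
--                 j += 1
--             output += sum(A[i:j])
--         else:
--             while j < n and A[j] <= 0:
--                 j += 1
--             if j - i >= 5:
--                 output += max(A[i:i + 5])
--         i = j
--     return output
-- ===== Notes on version B (the rewrite author's own statement) =====
-- stated objective: alternative
-- what changed: Replaced the single-pass stateful loop carrying a never-reset stack by a recursive run decomposition: split A into maximal same-sign runs, add sum of each positive run, and add max of the first five elements of each non-positive run of length >= 5.
import Mathlib
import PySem

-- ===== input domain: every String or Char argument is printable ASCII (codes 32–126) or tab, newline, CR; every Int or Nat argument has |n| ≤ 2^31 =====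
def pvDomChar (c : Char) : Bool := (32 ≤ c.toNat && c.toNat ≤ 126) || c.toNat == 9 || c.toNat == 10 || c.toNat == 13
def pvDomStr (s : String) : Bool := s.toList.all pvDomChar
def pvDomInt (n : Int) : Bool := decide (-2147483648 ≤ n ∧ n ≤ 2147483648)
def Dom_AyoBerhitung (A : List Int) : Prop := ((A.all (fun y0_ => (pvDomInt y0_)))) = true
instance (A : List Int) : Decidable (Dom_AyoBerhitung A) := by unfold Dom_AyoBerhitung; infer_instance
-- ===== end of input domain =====

-- B is an alternative decomposition of the same O(n) task (maximal same-sign runs instead of a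
-- stateful stack); equivalence of return values is proved on all inputs.

-- ===== PORT A =====
-- one iteration of A's for-loop: state = (output, stk)
def pvStep (s : Int × List Int) (i : Int) : Int × List Int :=
  if i > 0 then (s.1 + i, [])
  else if (s.2 ++ [i]).length = 5 then
    (s.1 + (PySem.List.max? (s.2 ++ [i]) (fun x => x)).getD 0, s.2 ++ [i])
  else (s.1, s.2 ++ [i])

def AyoBerhitung (A : List Int) : Int :=
  (A.foldl pvStep (0, [])).1

-- ===== PORT B =====
def AyoBerhitung_alt : List Int → Int
  | [] => 0
  | a :: t =>
    if 0 < a then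
      ((a :: t).takeWhile (fun x => decide (0 < x))).sum
        + AyoBerhitung_alt ((a :: t).dropWhile (fun x => decide (0 < x)))
    else
      (if 5 ≤ ((a :: t).takeWhile (fun x => decide (x ≤ 0))).length then
        (PySem.List.max? (((a :: t).takeWhile (fun x => decide (x ≤ 0))).take 5) (fun x => x)).getD 0
       else 0)
        + AyoBerhitung_alt ((a :: t).dropWhile (fun x => decide (x ≤ 0)))
  termination_by A => A.length
  decreasing_by
  · have := List.length_dropWhile_le (p := fun x : Int => decide (0 < x)) (l := t)
    simp [*]
  · have := List.length_dropWhile_le (p := fun x : Int => decide (x ≤ 0)) (l := t)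
    simp [show decide (a ≤ 0) = true by simp; omega]
    omega

-- ===== PRECONDITION & SPEC =====
def Spec_AyoBerhitung (A : List Int) (out : Int) : Prop := out = AyoBerhitung_alt A
instance (A : List Int) (out : Int) : Decidable (Spec_AyoBerhitung A out) := by unfold Spec_AyoBerhitung; infer_instance

-- ===== CLAIM (what is proved, stated in full; the proofs are below) =====
def Claim_equal_AyoBerhitung : Prop := ∀ (A : List Int), Dom_AyoBerhitung A → Spec_AyoBerhitung A (AyoBerhitung A)

-- ===== LEMMAS AND PROOFS =====

-- the output component of A's fold is additive in the initial output
lemma fold_add : ∀ (A : List Int) (out : Int) (stk : List Int),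
    (A.foldl pvStep (out, stk)).1 = out + (A.foldl pvStep (0, stk)).1 := by
  intro A
  induction A with
  | nil => intro out stk; simp
  | cons i t ih =>
    intro out stk
    simp only [List.foldl_cons, pvStep]
    split_ifs with h1 h2
    · rw [ih (out + i), ih (0 + i)]; ring
    · rw [ih, ih (0 + _)]; ring
    · rw [ih out, ih 0]

-- the stack is irrelevant when the remaining input is empty or starts positive
lemma stk_irrel : ∀ (rest : List Int) (out : Int) (s1 s2 : List Int),
    (rest = [] ∨ ∃ j t, rest = j :: t ∧ 0 < j) →
    (rest.foldl pvStep (out, s1)).1 = (rest.foldl pvStep (out, s2)).1 := by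
  rintro rest out s1 s2 (rfl | ⟨j, t, rfl, hj⟩)
  · rfl
  · simp [pvStep, hj]

-- consuming a run of positives starting from an empty stack
lemma pos_run_nil : ∀ (r : List Int), (∀ x ∈ r, 0 < x) → ∀ (out : Int) (rest : List Int),
    ((r ++ rest).foldl pvStep (out, [])) = rest.foldl pvStep (out + r.sum, []) := by
  intro r
  induction r with
  | nil => intro _ out rest; simp
  | cons i r' ih =>
    intro h out rest
    have hi : 0 < i := h i (by simp)
    simp only [List.cons_append, List.foldl_cons, pvStep, if_pos hi]
    rw [ih (fun x hx => h x (by simp [hx])) (out + i) rest, List.sum_cons, ← add_assoc]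

-- consuming a nonempty run of positives from any stack
lemma pos_run : ∀ (i : Int) (r : List Int), 0 < i → (∀ x ∈ r, 0 < x) →
    ∀ (out : Int) (stk rest : List Int),
    (((i :: r) ++ rest).foldl pvStep (out, stk)) = rest.foldl pvStep (out + (i :: r).sum, []) := by
  intro i r hi hr out stk rest
  simp only [List.cons_append, List.foldl_cons, pvStep, if_pos hi]
  rw [pos_run_nil r hr (out + i) rest, add_assoc, ← List.sum_cons]


-- consuming a run of non-positives: the bonus fires iff the combined stack reaches length 5
lemma neg_run : ∀ (r : List Int), (∀ x ∈ r, x ≤ 0) → ∀ (stk : List Int) (out : Int) (rest : List Int),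
    ((r ++ rest).foldl pvStep (out, stk)) =
      rest.foldl pvStep
        (out + (if stk.length < 5 ∧ 5 ≤ stk.length + r.length then
                  (PySem.List.max? ((stk ++ r).take 5) (fun x => x)).getD 0 else 0),
         stk ++ r) := by
  intro r
  induction r with
  | nil =>
    intro _ stk out rest
    simp only [List.nil_append, List.append_nil, List.length_nil, add_zero]
    rw [if_neg (by omega), add_zero]
  | cons i r' ih =>
    intro h stk out rest
    have hi : i ≤ 0 := h i (by simp)
    have hni : ¬ (0 < i) := by omega
    simp only [List.cons_append, List.foldl_cons, pvStep, if_neg hni]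
    by_cases h5 : (stk ++ [i]).length = 5
    · have hlen : stk.length = 4 := by simp at h5; omega
      rw [if_pos h5,
          ih (fun x hx => h x (by simp [hx])) (stk ++ [i]) _ rest]
      have hB' : ¬ ((stk ++ [i]).length < 5 ∧ 5 ≤ (stk ++ [i]).length + r'.length) := by
        simp only [List.length_append, List.length_cons, List.length_nil]; omega
      have hB : stk.length < 5 ∧ 5 ≤ stk.length + (i :: r').length := by
        simp only [List.length_cons]; omega
      have htake : ((stk ++ i :: r').take 5) = stk ++ [i] := by
        have : stk ++ i :: r' = (stk ++ [i]) ++ r' := by simp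
        rw [this, List.take_append_of_le_length (by simp [hlen]),
            List.take_of_length_le (by simp [hlen])]
      rw [if_neg hB', if_pos hB, htake]
      simp
    · rw [if_neg h5, ih (fun x hx => h x (by simp [hx])) (stk ++ [i]) out rest]
      have hcond : ((stk ++ [i]).length < 5 ∧ 5 ≤ (stk ++ [i]).length + r'.length)
          ↔ (stk.length < 5 ∧ 5 ≤ stk.length + (i :: r').length) := by
        simp at h5 ⊢; omega
      have hlist : (stk ++ [i]) ++ r' = stk ++ i :: r' := by simp
      by_cases hc : stk.length < 5 ∧ 5 ≤ stk.length + (i :: r').length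
      · rw [if_pos (hcond.mpr hc), if_pos hc, hlist]
      · rw [if_neg (fun hx => hc (hcond.mp hx)), if_neg hc, hlist]

-- the head of a dropWhile result falsifies the predicate
lemma dropWhile_head_false {p : Int → Bool} : ∀ (l : List Int) (j : Int) (t : List Int),
    l.dropWhile p = j :: t → p j = false := by
  intro l
  induction l with
  | nil => intro j t h; simp at h
  | cons a l' ih =>
    intro j t h
    by_cases hp : p a
    · rw [List.dropWhile_cons_of_pos hp] at h; exact ih j t h
    · rw [List.dropWhile_cons_of_neg hp] at h
      cases h; simpa using hp

lemma main_eq : ∀ (A : List Int), AyoBerhitung A = AyoBerhitung_alt A := by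
  intro A
  induction A using AyoBerhitung_alt.induct with
  | case1 => simp [AyoBerhitung, AyoBerhitung_alt]
  | case2 a t ha ih =>
    rw [AyoBerhitung_alt, if_pos ha]
    set p : Int → Bool := fun x => decide (0 < x) with hp
    have hsplit : a :: t = (a :: t).takeWhile p ++ (a :: t).dropWhile p :=
      (List.takeWhile_append_dropWhile).symm
    have htw : (a :: t).takeWhile p = a :: t.takeWhile p := by
      simp [hp, ha]
    have hdw : (a :: t).dropWhile p = t.dropWhile p := by
      simp [hp, ha]
    have hall : ∀ x ∈ t.takeWhile p, 0 < x := by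
      intro x hx; simpa [hp] using List.mem_takeWhile_imp hx
    unfold AyoBerhitung at ih ⊢
    rw [hdw] at ih ⊢
    conv_lhs => rw [hsplit, htw, hdw]
    rw [pos_run a (t.takeWhile p) ha hall 0 [] (t.dropWhile p), fold_add, ih, htw]
    ring
  | case3 a t ha ih =>
    rw [AyoBerhitung_alt, if_neg ha]
    set q : Int → Bool := fun x => decide (x ≤ 0) with hq
    have hsplit : a :: t = (a :: t).takeWhile q ++ (a :: t).dropWhile q :=
      (List.takeWhile_append_dropWhile).symm
    have hall : ∀ x ∈ (a :: t).takeWhile q, x ≤ 0 := by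
      intro x hx; simpa [hq] using List.mem_takeWhile_imp hx
    have hrest : (a :: t).dropWhile q = [] ∨
        ∃ j t', (a :: t).dropWhile q = j :: t' ∧ 0 < j := by
      cases hdw : (a :: t).dropWhile q with
      | nil => exact Or.inl rfl
      | cons j t' =>
        refine Or.inr ⟨j, t', rfl, ?_⟩
        have := dropWhile_head_false (a :: t) j t' hdw
        simp [hq] at this; omega
    unfold AyoBerhitung at ih ⊢
    conv_lhs => rw [hsplit]
    rw [neg_run ((a :: t).takeWhile q) hall [] 0 ((a :: t).dropWhile q)]
    rw [stk_irrel _ _ _ [] hrest, fold_add, ih]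
    simp only [List.nil_append, List.length_nil, zero_add]
    by_cases h5 : 5 ≤ ((a :: t).takeWhile q).length
    · rw [if_pos (⟨by norm_num, h5⟩ : 0 < 5 ∧ 5 ≤ ((a :: t).takeWhile q).length), if_pos h5]
    · rw [if_neg (fun hx => h5 hx.2), if_neg h5]

-- ===== VERDICT (by name: the statement is the Claim_ definition above) =====
theorem AyoBerhitung_spec : Claim_equal_AyoBerhitung := by
  intro A _
  unfold Spec_AyoBerhitung
  exact main_eq A
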